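-- pv_equiv track=rewrite | github.com/brm2167/euler | largestgridproduct.py | largest_product_grid
-- ===== SOURCE A (Python) =====
-- def largest_product_grid(length: int, grid: list) -> int:
--     largest_product: int = 0
--     for i in range(len(grid)):
--         for j in range(len(grid[i])):
--             #Left to right
--             if j < len(grid) - length + 1:
--                 product: int = 1
--
--                 for k in range(j, j + length):
--                     product *= grid[i][k]
--
--                 if product > largest_product:
--                     largest_product = product
--
--             #Up-down
--             if i < len(grid) - length + 1:
--                 product: int = 1
--
--                 for k in range(i, i + length):
--                     product *= grid[k][j]
--
--                 if product > largest_product: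
--                     largest_product = product
--
--             #Up-right diagonal
--             if i + 1 >= length and j < len(grid) - length + 1:
--                 product: int = 1
--
--                 for k in range(length):
--                     product *= grid[i - k][j + k]
--
--                 if product > largest_product:
--                     largest_product = product
--
--             #Down-right diagonal
--             if i < len(grid) - length + 1 and j < len(grid) - length + 1:
--                 product: int = 1
--
--                 for k in range(length):
--                     product *= grid[i + k][j + k]
--
--                 if product > largest_product:
--                     largest_product = product
--
--     return largest_product
-- ===== SOURCE B (Python) =====
-- def largest_product_grid(length: int, grid: list) -> int:
--     n = len(grid)
--     if length <= 0:
--         # a window of non-positive length is empty: its product is 1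
--         return 1 if any(len(row) > 0 for row in grid) else 0
--     longest = max([len(grid)] + [len(row) for row in grid])
--     if length > longest:
--         return 0  # no grid line is long enough to hold a window
--     lines = []
--     lines.extend(grid)  # rows
--     lines.extend([[row[j] for row in grid if j < len(row)] for j in range(n)])  # columns
--     lines.extend([[grid[i][i - d] for i in range(n) if 0 <= i - d < len(grid[i])]
--                   for d in range(-(n - 1), n)])  # down-right diagonals
--     lines.extend([[grid[c - j][j] for j in range(n) if 0 <= c - j < n and j < len(grid[c - j])]
--                   for c in range(2 * n - 1)])  # up-right anti-diagonals
--     best = 0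
--     for line in lines:
--         prod, zeros = 1, 0
--         for e, x in enumerate(line):
--             if x == 0:
--                 zeros += 1
--             else:
--                 prod *= x
--             if e >= length:
--                 y = line[e - length]
--                 if y == 0:
--                     zeros -= 1
--                 else:
--                     prod //= y
--             if e >= length - 1 and zeros == 0 and prod > best:
--                 best = prod
--     return best
-- ===== Notes on version B (the rewrite author's own statement) =====
-- stated objective: faster
-- what changed: A recomputes every length-window product from scratch at each cell (four nested scans); B extracts each grid line (rows, columns, both diagonal directions) once and slides a window along it, maintaining the product of the nonzero entries and a zero-count incrementally (one pass per line), returning 0 immediately when no line is long enough to hold a window.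
-- outside the precondition, e.g. on largest_product_grid(2, [[1, 2], [3, 4, 5]]): A returns 12, B returns 20; on largest_product_grid(2, [[5, 7]]): A returns 0, B returns 35
import Mathlib
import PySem

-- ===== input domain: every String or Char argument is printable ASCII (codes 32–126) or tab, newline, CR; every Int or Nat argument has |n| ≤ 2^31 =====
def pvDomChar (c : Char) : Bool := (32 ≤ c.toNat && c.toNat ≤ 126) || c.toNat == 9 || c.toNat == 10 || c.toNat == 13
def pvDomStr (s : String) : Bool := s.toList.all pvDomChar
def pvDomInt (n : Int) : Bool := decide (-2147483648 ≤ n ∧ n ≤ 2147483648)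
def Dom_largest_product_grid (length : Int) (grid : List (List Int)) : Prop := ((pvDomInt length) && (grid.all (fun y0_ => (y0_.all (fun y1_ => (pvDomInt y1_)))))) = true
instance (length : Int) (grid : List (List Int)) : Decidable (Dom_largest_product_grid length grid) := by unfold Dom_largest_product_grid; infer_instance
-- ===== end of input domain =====

-- B replaces A's per-cell recomputation of every window by one sliding-window pass per grid
-- line (rows, columns, diagonals) with an incremental nonzero-product and a zero-count.

-- ===== PORT A =====
def largest_product_grid (length : Int) (grid : List (List Int)) : Int :=
  let n : Int := grid.length
  (PySem.List.pyRange 0 n 1).foldl (fun best i =>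
    let row := PySem.List.pyGetD grid i []
    (PySem.List.pyRange 0 (row.length : Int) 1).foldl (fun best j =>
      -- Left to right
      let best :=
        if j < n - length + 1 then
          let product := (PySem.List.pyRange j (j + length) 1).foldl
            (fun p k => p * PySem.List.pyGetD row k 0) 1
          if best < product then product else best
        else best
      -- Up-down
      let best :=
        if i < n - length + 1 then
          let product := (PySem.List.pyRange i (i + length) 1).foldl
            (fun p k => p * PySem.List.pyGetD (PySem.List.pyGetD grid k []) j 0) 1
          if best < product then product else best
        else best
      -- Up-right diagonal
      let best :=
        if length ≤ i + 1 ∧ j < n - length + 1 then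
          let product := (PySem.List.pyRange 0 length 1).foldl
            (fun p k => p * PySem.List.pyGetD (PySem.List.pyGetD grid (i - k) []) (j + k) 0) 1
          if best < product then product else best
        else best
      -- Down-right diagonal
      let best :=
        if i < n - length + 1 ∧ j < n - length + 1 then
          let product := (PySem.List.pyRange 0 length 1).foldl
            (fun p k => p * PySem.List.pyGetD (PySem.List.pyGetD grid (i + k) []) (j + k) 0) 1
          if best < product then product else best
        else best
      best) best) 0

-- ===== PORT B =====
-- per-line sliding window: incremental product of the nonzero entries + count of zeros
def pvScanLine (length : Int) (line : List Int) (best0 : Int) : Int :=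
  ((PySem.List.enumerate line).foldl (fun (st : Int × Int × Int) ex =>
      let best := st.1
      let prod := st.2.1
      let zeros := st.2.2
      let e := ex.1
      let x := ex.2
      let pz : Int × Int := if x = 0 then (prod, zeros + 1) else (prod * x, zeros)
      let pz : Int × Int :=
        if length ≤ e then
          let y := PySem.List.pyGetD line (e - length) 0
          if y = 0 then (pz.1, pz.2 - 1) else (PySem.Int.floordiv pz.1 y, pz.2)
        else pz
      let best := if length - 1 ≤ e ∧ pz.2 = 0 ∧ best < pz.1 then pz.1 else best
      (best, pz.1, pz.2)) (best0, 1, 0)).1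

def pvLines (grid : List (List Int)) : List (List Int) :=
  let n : Int := grid.length
  grid ++
  (PySem.List.pyRange 0 n 1).map (fun j =>
    (grid.filter (fun row => decide (j < (row.length : Int)))).map
      (fun row => PySem.List.pyGetD row j 0)) ++
  (PySem.List.pyRange (-(n - 1)) n 1).map (fun d =>
    ((PySem.List.pyRange 0 n 1).filter (fun i =>
        decide (0 ≤ i - d) && decide (i - d < ((PySem.List.pyGetD grid i []).length : Int)))).map
      (fun i => PySem.List.pyGetD (PySem.List.pyGetD grid i []) (i - d) 0)) ++
  (PySem.List.pyRange 0 (2 * n - 1) 1).map (fun c =>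
    ((PySem.List.pyRange 0 n 1).filter (fun j =>
        decide (0 ≤ c - j) && decide (c - j < n) &&
        decide (j < ((PySem.List.pyGetD grid (c - j) []).length : Int)))).map
      (fun j => PySem.List.pyGetD (PySem.List.pyGetD grid (c - j) []) j 0))

def largest_product_grid_alt (length : Int) (grid : List (List Int)) : Int :=
  if length ≤ 0 then
    -- a window of non-positive length is empty: its product is 1
    if grid.any (fun row => decide (0 < row.length)) then 1 else 0
  else
    let longest : Int := (grid.map (fun row => (row.length : Int))).foldl max (grid.length : Int)
    if longest < length then 0  -- no grid line is long enough to hold a window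
    else (pvLines grid).foldl (fun best line => pvScanLine length line best) 0

-- ===== PRECONDITION & SPEC =====
-- Pre_ restricts to A's natural domain: a square grid (every row as long as the grid), plus any
-- grid at all when length ≤ 1 (then A never indexes a row out of range) or when length exceeds
-- every row length and the grid height (no window fits, both return 0). On other ragged grids A
-- either raises IndexError or scans an accidental subset of windows picked by mixing row lengths
-- with the grid height.
def Pre_largest_product_grid (length : Int) (grid : List (List Int)) : Prop :=
  length ≤ 1 ∨ (∀ row ∈ grid, row.length = grid.length) ∨
    ((grid.length : Int) < length ∧ ∀ row ∈ grid, (row.length : Int) < length)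
instance (length : Int) (grid : List (List Int)) : Decidable (Pre_largest_product_grid length grid) := by
  unfold Pre_largest_product_grid; infer_instance
def pvWitness_largest_product_grid : Int × List (List Int) :=
  (2, [[1, 2, 3], [4, 5, 6], [7, 8, 9]])
def Spec_largest_product_grid (length : Int) (grid : List (List Int)) (out : Int) : Prop := out = largest_product_grid_alt length grid
instance (length : Int) (grid : List (List Int)) (out : Int) : Decidable (Spec_largest_product_grid length grid out) := by unfold Spec_largest_product_grid; infer_instance

-- ===== CLAIM (what is proved, stated in full; the proofs are below) =====
def Claim_equal_largest_product_grid : Prop := ∀ (length : Int) (grid : List (List Int)), Dom_largest_product_grid length grid → Pre_largest_product_grid length grid → Spec_largest_product_grid length grid (largest_product_grid length grid)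

-- ===== LEMMAS AND PROOFS =====

theorem pvIfMax (b p : Int) : (if b < p then p else b) = max b p := by
  rw [max_def]; split_ifs <;> omega

theorem pvFoldlMaxMem (l : List Int) (a : Int) : l.foldl max a = a ∨ l.foldl max a ∈ l := by
  induction l generalizing a with
  | nil => left; rfl
  | cons x xs ih =>
    simp only [List.foldl_cons]
    rcases ih (max a x) with h | h
    · rcases max_choice a x with hm | hm
      · left; rw [h, hm]
      · right; rw [h, hm]; exact List.mem_cons_self ..
    · right; exact List.mem_cons_of_mem _ h

theorem pvFoldlMaxEq (l₁ l₂ : List Int) (a : Int)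
    (h₁ : ∀ x ∈ l₁, x ∈ l₂) (h₂ : ∀ x ∈ l₂, x ∈ l₁) : l₁.foldl max a = l₂.foldl max a := by
  apply le_antisymm
  · rcases pvFoldlMaxMem l₁ a with h | h
    · rw [h]; exact (PySem.List.le_foldl_max l₂ a).1
    · exact (PySem.List.le_foldl_max l₂ a).2 _ (h₁ _ h)
  · rcases pvFoldlMaxMem l₂ a with h | h
    · rw [h]; exact (PySem.List.le_foldl_max l₁ a).1
    · exact (PySem.List.le_foldl_max l₁ a).2 _ (h₂ _ h)

theorem pvFoldlMul (l : List Int) (f : Int → Int) : l.foldl (fun p k => p * f k) 1 = (l.map f).prod := by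
  rw [List.prod_eq_foldl, List.foldl_map]

theorem pvDropTake {α : Type} (xs : List α) (s L : Nat) (d : α) (h : s + L ≤ xs.length) :
    (xs.drop s).take L = (List.range L).map (fun k => xs.getD (s + k) d) := by
  apply List.ext_getElem
  · simp; omega
  · intro k h1 h2
    have hk : k < L := by simpa using h2
    simp [List.getD_eq_getElem?_getD, List.getElem?_eq_getElem (by omega : s + k < xs.length)]
def pvPH (length : Int) (row : List Int) (j : Int) : Int :=
  (PySem.List.pyRange j (j + length) 1).foldl (fun p k => p * PySem.List.pyGetD row k 0) 1
def pvPV (length : Int) (grid : List (List Int)) (i j : Int) : Int :=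
  (PySem.List.pyRange i (i + length) 1).foldl
    (fun p k => p * PySem.List.pyGetD (PySem.List.pyGetD grid k []) j 0) 1
def pvPU (length : Int) (grid : List (List Int)) (i j : Int) : Int :=
  (PySem.List.pyRange 0 length 1).foldl
    (fun p k => p * PySem.List.pyGetD (PySem.List.pyGetD grid (i - k) []) (j + k) 0) 1
def pvPD (length : Int) (grid : List (List Int)) (i j : Int) : Int :=
  (PySem.List.pyRange 0 length 1).foldl
    (fun p k => p * PySem.List.pyGetD (PySem.List.pyGetD grid (i + k) []) (j + k) 0) 1

def pvCellCands (length : Int) (grid : List (List Int)) (i j : Int) : List Int :=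
  (if j < (grid.length : Int) - length + 1 then [pvPH length (PySem.List.pyGetD grid i []) j] else []) ++
  (if i < (grid.length : Int) - length + 1 then [pvPV length grid i j] else []) ++
  (if length ≤ i + 1 ∧ j < (grid.length : Int) - length + 1 then [pvPU length grid i j] else []) ++
  (if i < (grid.length : Int) - length + 1 ∧ j < (grid.length : Int) - length + 1 then [pvPD length grid i j] else [])

def pvCandsA (length : Int) (grid : List (List Int)) : List Int :=
  (PySem.List.pyRange 0 (grid.length : Int) 1).flatMap (fun i =>
    (PySem.List.pyRange 0 ((PySem.List.pyGetD grid i []).length : Int) 1).flatMap (fun j =>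
      pvCellCands length grid i j))

theorem pvStep (c : Prop) [Decidable c] (b p : Int) :
    (if c then if b < p then p else b else b) = List.foldl max b (if c then [p] else []) := by
  by_cases hc : c <;> simp [hc, pvIfMax]

theorem pvA_eq (length : Int) (grid : List (List Int)) :
    largest_product_grid length grid = (pvCandsA length grid).foldl max 0 := by
  rw [pvCandsA, List.foldl_flatMap]
  unfold largest_product_grid
  apply List.foldl_ext
  intro best i _
  rw [List.foldl_flatMap]
  apply List.foldl_ext
  intro b j _
  unfold pvCellCands pvPH pvPV pvPU pvPD
  simp only [List.foldl_append]
  rw [pvStep, pvStep, pvStep, pvStep]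
def pvPNZ (l : List Int) : Int := (l.filter (· ≠ 0)).prod

def pvWinP (L : Nat) (line : List Int) (s : Nat) : Int := ((line.drop s).take L).prod

def pvWinProds (L : Nat) (line : List Int) : List Int :=
  (List.range (line.length + 1 - L)).map (pvWinP L line)

def pvStepFn (length : Int) (line : List Int) : (Int × Int × Int) → Int → (Int × Int × Int) :=
  fun st e =>
    let best := st.1
    let prod := st.2.1
    let zeros := st.2.2
    let x := PySem.List.pyGetD line e 0
    let pz : Int × Int := if x = 0 then (prod, zeros + 1) else (prod * x, zeros)
    let pz : Int × Int :=
      if length ≤ e then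
        let y := PySem.List.pyGetD line (e - length) 0
        if y = 0 then (pz.1, pz.2 - 1) else (PySem.Int.floordiv pz.1 y, pz.2)
      else pz
    let best := if length - 1 ≤ e ∧ pz.2 = 0 ∧ best < pz.1 then pz.1 else best
    (best, pz.1, pz.2)

theorem pvScanLine_eq_stepfn (length : Int) (line : List Int) (best0 : Int) :
    pvScanLine length line best0 =
      ((PySem.List.pyRange 0 (line.length : Int) 1).foldl (pvStepFn length line) (best0, 1, 0)).1 := by
  unfold pvScanLine pvStepFn
  rw [PySem.List.enumerate_eq_map_pyRange line 0, List.foldl_map]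
  simp [PySem.List.len]

theorem pvFloordivCancel (y t : Int) (hy : y ≠ 0) : PySem.Int.floordiv (y * t) y = t := by
  have h := PySem.Int.floordiv_mul_add_mod (y * t) y
  have hm : PySem.Int.mod (y * t) y = 0 := (PySem.Int.mod_eq_zero_iff_dvd _ _).mpr ⟨t, rfl⟩
  rw [hm, add_zero] at h
  have := mul_right_cancel₀ hy (h.trans (mul_comm y t))
  exact this

theorem pvPNZ_append_single (w : List Int) (x : Int) :
    pvPNZ (w ++ [x]) = if x = 0 then pvPNZ w else pvPNZ w * x := by
  by_cases hx : x = 0 <;> simp [pvPNZ, List.filter_append, hx]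

theorem pvPNZ_cons (y : Int) (w : List Int) :
    pvPNZ (y :: w) = if y = 0 then pvPNZ w else y * pvPNZ w := by
  by_cases hy : y = 0 <;> simp [pvPNZ, hy]

theorem pvPNZ_eq_prod (l : List Int) (h : l.count 0 = 0) : pvPNZ l = l.prod := by
  unfold pvPNZ
  congr 1
  apply List.filter_eq_self.mpr
  intro x hx
  simp only [ne_eq, decide_eq_true_eq]
  intro h0
  subst h0
  exact absurd (List.count_pos_iff.mpr hx) (by omega)

theorem pvProd_eq_zero (l : List Int) (h : l.count 0 ≠ 0) : l.prod = 0 :=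
  List.prod_eq_zero (List.count_pos_iff.mp (by omega))

theorem pvScanInv (length : Int) (hL : 1 ≤ length) (line : List Int) (best : Int) (hB : 0 ≤ best)
    (m : Nat) (hm : m ≤ line.length) :
    (PySem.List.pyRange 0 (m : Int) 1).foldl (pvStepFn length line) (best, 1, 0) =
      (((List.range (m + 1 - length.toNat)).map (pvWinP length.toNat line)).foldl max best,
       pvPNZ ((line.take m).drop (m - length.toNat)),
       (((line.take m).drop (m - length.toNat)).count 0 : Int)) := by
  induction m with
  | zero =>
    have h0 : (1 : Nat) - length.toNat = 0 := by omega
    simp [PySem.List.pyRange_one_eq_nil (by omega : (0:Int) ≤ 0), h0, pvPNZ]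
  | succ m ih =>
    have hm' : m ≤ line.length := Nat.le_of_succ_le hm
    have hmlt : m < line.length := hm
    have hL0 : 0 ≤ length := by omega
    have hLc : (length.toNat : Int) = length := Int.toNat_of_nonneg hL0
    have hL1 : 1 ≤ length.toNat := by omega
    have hcast : ((m + 1 : Nat) : Int) = (m : Int) + 1 := by push_cast; ring
    rw [hcast, PySem.List.pyRange_one_succ_right (by exact_mod_cast Int.natCast_nonneg m)]
    rw [List.foldl_append, ih hm']
    simp only [List.foldl_cons, List.foldl_nil]
    set L := length.toNat with hLdef
    have hx : PySem.List.pyGetD line (m : Int) 0 = line.getD m 0 := by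
      rw [PySem.List.pyGetD_natCast]
    have htake : line.take (m + 1) = line.take m ++ [line.getD m 0] := by
      rw [List.take_add_one, List.getElem?_eq_getElem hmlt]
      rw [List.getD_eq_getElem _ _ hmlt]
      rfl
    have hlentk : (line.take m).length = m := by simp [hm']
    have hlentk1 : (line.take (m + 1)).length = m + 1 := by simp [hm]
    have hstage1 : (if line.getD m 0 = 0
          then (pvPNZ ((line.take m).drop (m - L)), (((line.take m).drop (m - L)).count 0 : Int) + 1)
          else (pvPNZ ((line.take m).drop (m - L)) * line.getD m 0,
                (((line.take m).drop (m - L)).count 0 : Int))) =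
        (pvPNZ ((line.take (m + 1)).drop (m - L)), (((line.take (m + 1)).drop (m - L)).count 0 : Int)) := by
      have hmid : (line.take (m + 1)).drop (m - L) =
          ((line.take m).drop (m - L)) ++ [line.getD m 0] := by
        rw [htake, List.drop_append_of_le_length (by omega)]
      rw [hmid, pvPNZ_append_single, List.count_append]
      by_cases h0 : line.getD m 0 = 0
      · rw [if_pos h0, if_pos h0]
        refine congrArg₂ Prod.mk rfl ?_
        have hc1 : List.count 0 [line.getD m 0] = 1 := by rw [h0]; simp
        rw [hc1]
        push_cast
        ring
      · rw [if_neg h0, if_neg h0]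
        refine congrArg₂ Prod.mk rfl ?_
        have hc1 : List.count 0 [line.getD m 0] = 0 := by
          refine List.count_eq_zero.mpr ?_
          intro hmem
          rw [List.mem_singleton] at hmem
          exact h0 hmem.symm
        rw [hc1]
        simp
    have hstage2 : (if length ≤ (m : Int) then
          (if PySem.List.pyGetD line ((m : Int) - length) 0 = 0 then
            (pvPNZ ((line.take (m + 1)).drop (m - L)),
             (((line.take (m + 1)).drop (m - L)).count 0 : Int) - 1)
          else
            (PySem.Int.floordiv (pvPNZ ((line.take (m + 1)).drop (m - L)))
               (PySem.List.pyGetD line ((m : Int) - length) 0),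
             (((line.take (m + 1)).drop (m - L)).count 0 : Int)))
        else (pvPNZ ((line.take (m + 1)).drop (m - L)),
              (((line.take (m + 1)).drop (m - L)).count 0 : Int))) =
        (pvPNZ ((line.take (m + 1)).drop (m + 1 - L)),
         (((line.take (m + 1)).drop (m + 1 - L)).count 0 : Int)) := by
      by_cases hc : length ≤ (m : Int)
      · have hLm : L ≤ m := by omega
        have hyidx : (m : Int) - length = ((m - L : Nat) : Int) := by omega
        have hycast : PySem.List.pyGetD line ((m : Int) - length) 0 = line.getD (m - L) 0 := by
          rw [hyidx, PySem.List.pyGetD_natCast]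
        have h1 : m - L < (line.take (m + 1)).length := by omega
        have hsplit : (line.take (m + 1)).drop (m - L) =
            line.getD (m - L) 0 :: (line.take (m + 1)).drop (m + 1 - L) := by
          rw [List.drop_eq_getElem_cons h1]
          congr 1
          · rw [List.getElem_take]
            exact (List.getD_eq_getElem _ _ (by omega)).symm
          · congr 1
            omega
        rw [if_pos hc, hycast, hsplit, pvPNZ_cons, List.count_cons]
        by_cases hy0 : line.getD (m - L) 0 = 0
        · rw [if_pos hy0, if_pos hy0]
          refine congrArg₂ Prod.mk rfl ?_
          simp only [hy0, beq_self_eq_true, if_true]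
          push_cast
          ring
        · rw [if_neg hy0, if_neg hy0]
          refine congrArg₂ Prod.mk ?_ ?_
          · exact pvFloordivCancel _ _ hy0
          · simp
            simpa [List.getD] using hy0
      · have he1 : m - L = 0 := by omega
        have he2 : m + 1 - L = 0 := by omega
        rw [if_neg hc, he1, he2]
    have hBfold : 0 ≤ (List.map (pvWinP L line) (List.range (m + 1 - L))).foldl max best :=
      le_trans hB (PySem.List.le_foldl_max _ best).1
    have hstage3 : (if length - 1 ≤ (m : Int) ∧
            (((line.take (m + 1)).drop (m + 1 - L)).count 0 : Int) = 0 ∧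
            (List.map (pvWinP L line) (List.range (m + 1 - L))).foldl max best <
              pvPNZ ((line.take (m + 1)).drop (m + 1 - L))
          then pvPNZ ((line.take (m + 1)).drop (m + 1 - L))
          else (List.map (pvWinP L line) (List.range (m + 1 - L))).foldl max best) =
        (List.map (pvWinP L line) (List.range (m + 1 + 1 - L))).foldl max best := by
      by_cases hem : L ≤ m + 1
      · have hr : m + 1 + 1 - L = (m + 1 - L) + 1 := by omega
        rw [hr, List.range_succ, List.map_append, List.foldl_append]
        simp only [List.map_cons, List.map_nil, List.foldl_cons, List.foldl_nil]
        have hwp : pvWinP L line (m + 1 - L) = ((line.take (m + 1)).drop (m + 1 - L)).prod := by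
          unfold pvWinP
          rw [List.drop_take, show m + 1 - (m + 1 - L) = L from by omega]
        have hemI : length - 1 ≤ (m : Int) := by omega
        by_cases hz : (((line.take (m + 1)).drop (m + 1 - L)).count 0 : Int) = 0
        · have hz' : ((line.take (m + 1)).drop (m + 1 - L)).count 0 = 0 := by exact_mod_cast hz
          rw [hwp, ← pvPNZ_eq_prod _ hz']
          simp only [hemI, hz, true_and]
          rw [pvIfMax]
        · have hz' : ((line.take (m + 1)).drop (m + 1 - L)).count 0 ≠ 0 := fun h => hz (by exact_mod_cast h)
          rw [hwp, pvProd_eq_zero _ hz']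
          rw [if_neg (by tauto)]
          exact (max_eq_left hBfold).symm
      · have hemI : ¬(length - 1 ≤ (m : Int)) := by omega
        have hr : m + 1 + 1 - L = m + 1 - L := by omega
        rw [if_neg (by tauto), hr]
    unfold pvStepFn
    simp only [hx]
    rw [hstage1]
    rw [hstage2, hstage3]

theorem pvScan_eq (length : Int) (hL : 1 ≤ length) (line : List Int) (best : Int) (hB : 0 ≤ best) :
    pvScanLine length line best = (pvWinProds length.toNat line).foldl max best := by
  rw [pvScanLine_eq_stepfn, pvScanInv length hL line best hB line.length le_rfl]
  rfl

theorem pvScanFold (length : Int) (hL : 1 ≤ length) :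
    ∀ (ls : List (List Int)) (best : Int), 0 ≤ best →
      ls.foldl (fun b line => pvScanLine length line b) best =
        (ls.flatMap (pvWinProds length.toNat)).foldl max best := by
  intro ls
  induction ls with
  | nil => intro best _; rfl
  | cons l ls ih =>
    intro best hB
    rw [List.foldl_cons, List.flatMap_cons, List.foldl_append, pvScan_eq length hL l best hB]
    exact ih _ (le_trans hB (PySem.List.le_foldl_max _ _).1)

def pvCandsB (L : Nat) (grid : List (List Int)) : List Int :=
  (pvLines grid).flatMap (pvWinProds L)

theorem pvB_eq (length : Int) (hL : 1 ≤ length) (grid : List (List Int))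
    (hg : ¬ (grid.map (fun row => (row.length : Int))).foldl max (grid.length : Int) < length) :
    largest_product_grid_alt length grid = (pvCandsB length.toNat grid).foldl max 0 := by
  unfold largest_product_grid_alt pvCandsB
  rw [if_neg (by omega), if_neg hg]
  exact pvScanFold length hL (pvLines grid) 0 le_rfl

def pvCell (grid : List (List Int)) (i j : Nat) : Int := (grid.getD i []).getD j 0

def pvWinH (grid : List (List Int)) (L i j : Nat) : Int :=
  ((List.range L).map (fun k => pvCell grid i (j + k))).prod
def pvWinV (grid : List (List Int)) (L i j : Nat) : Int :=
  ((List.range L).map (fun k => pvCell grid (i + k) j)).prod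
def pvWinD (grid : List (List Int)) (L i j : Nat) : Int :=
  ((List.range L).map (fun k => pvCell grid (i + k) (j + k))).prod
def pvWinU (grid : List (List Int)) (L i j : Nat) : Int :=
  ((List.range L).map (fun k => pvCell grid (i - k) (j + k))).prod

def pvIsCand (L : Nat) (grid : List (List Int)) (p : Int) : Prop :=
  (∃ i j : Nat, i < grid.length ∧ j + L ≤ grid.length ∧ p = pvWinH grid L i j) ∨
  (∃ i j : Nat, i + L ≤ grid.length ∧ j < grid.length ∧ p = pvWinV grid L i j) ∨
  (∃ i j : Nat, L ≤ i + 1 ∧ i < grid.length ∧ j + L ≤ grid.length ∧ p = pvWinU grid L i j) ∨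
  (∃ i j : Nat, i + L ≤ grid.length ∧ j + L ≤ grid.length ∧ p = pvWinD grid L i j)

def pvIsCell (grid : List (List Int)) (p : Int) : Prop :=
  ∃ i j : Nat, i < grid.length ∧ j < (grid.getD i []).length ∧ p = pvCell grid i j

theorem pvMemWinProds (L : Nat) (_hL : 1 ≤ L) (line : List Int) (p : Int) :
    p ∈ pvWinProds L line ↔ ∃ s, s + L ≤ line.length ∧ p = pvWinP L line s := by
  unfold pvWinProds
  simp only [List.mem_map, List.mem_range]
  constructor
  · rintro ⟨s, hs, rfl⟩
    exact ⟨s, by omega, rfl⟩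
  · rintro ⟨s, hs, rfl⟩
    exact ⟨s, by omega, rfl⟩

theorem pvGetD_mapRange (g : Nat → Int) (M t : Nat) (h : t < M) :
    ((List.range M).map g).getD t 0 = g t := by
  rw [List.getD_eq_getElem _ _ (by simpa using h)]
  simp

theorem pvWinP_mapRange (g : Nat → Int) (M s L : Nat) (h : s + L ≤ M) :
    pvWinP L ((List.range M).map g) s = ((List.range L).map (fun k => g (s + k))).prod := by
  unfold pvWinP
  rw [pvDropTake _ s L 0 (by simpa using h)]
  congr 1
  apply List.map_congr_left
  intro k hk
  rw [List.mem_range] at hk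
  exact pvGetD_mapRange g M (s + k) (by omega)

theorem pvFilterRange (lo hi : Int) : ∀ (N : Nat) (a b : Int), (b - a).toNat = N →
    (PySem.List.pyRange a b 1).filter (fun x => decide (lo ≤ x) && decide (x < hi)) =
      PySem.List.pyRange (max a lo) (min b hi) 1 := by
  intro N
  induction N with
  | zero =>
    intro a b h
    rw [PySem.List.pyRange_one_eq_nil (by omega), List.filter_nil,
        PySem.List.pyRange_one_eq_nil (by omega)]
  | succ N ihN =>
    intro a b h
    have hab : a < b := by omega
    rw [PySem.List.pyRange_one_cons hab, List.filter_cons]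
    by_cases hcond : lo ≤ a ∧ a < hi
    · rw [if_pos (by simp [hcond.1, hcond.2])]
      rw [ihN (a + 1) b (by omega)]
      rw [show max a lo = a from by omega, show max (a + 1) lo = a + 1 from by omega,
          PySem.List.pyRange_one_cons (by omega : a < min b hi)]
    · rw [if_neg (by simp; omega)]
      rw [ihN (a + 1) b (by omega)]
      by_cases hlo : lo ≤ a
      · have hha : hi ≤ a := by omega
        rw [PySem.List.pyRange_one_eq_nil (by omega), PySem.List.pyRange_one_eq_nil (by omega)]
      · rw [show max (a + 1) lo = lo from by omega, show max a lo = lo from by omega]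

theorem pvProdRange (f : Int → Int) (a : Int) (L : Nat) :
    (PySem.List.pyRange a (a + (L : Int)) 1).foldl (fun p k => p * f k) 1 =
      ((List.range L).map (fun (k : Nat) => f (a + (k : Int)))).prod := by
  rw [pvFoldlMul, PySem.List.pyRange_one]
  rw [show (a + (L : Int) - a).toNat = L from by omega]
  rw [List.map_map]
  congr 1

theorem pvProdRange0 (f : Int → Int) (b : Int) (hb : 0 ≤ b) :
    (PySem.List.pyRange 0 b 1).foldl (fun p k => p * f k) 1 =
      ((List.range b.toNat).map (fun (k : Nat) => f (k : Int))).prod := by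
  rw [pvFoldlMul, PySem.List.pyRange_one, show (b - 0).toNat = b.toNat from by omega, List.map_map]
  congr 1
  apply List.map_congr_left
  intro k _
  simp [Function.comp]

theorem pvPH_eq (length : Int) (hL0 : 0 ≤ length) (grid : List (List Int)) (i j : Nat) :
    pvPH length (PySem.List.pyGetD grid (i : Int) []) (j : Int) = pvWinH grid length.toNat i j := by
  unfold pvPH pvWinH
  rw [show (j : Int) + length = (j : Int) + (length.toNat : Int) from by omega, pvProdRange]
  congr 1
  apply List.map_congr_left
  intro k hk
  rw [show (j : Int) + (k : Int) = ((j + k : Nat) : Int) from by push_cast; ring]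
  simp only [PySem.List.pyGetD_natCast]
  rfl

theorem pvPV_eq (length : Int) (hL0 : 0 ≤ length) (grid : List (List Int)) (i j : Nat) :
    pvPV length grid (i : Int) (j : Int) = pvWinV grid length.toNat i j := by
  unfold pvPV pvWinV
  rw [show (i : Int) + length = (i : Int) + (length.toNat : Int) from by omega, pvProdRange]
  congr 1
  apply List.map_congr_left
  intro k hk
  rw [show (i : Int) + (k : Int) = ((i + k : Nat) : Int) from by push_cast; ring]
  simp only [PySem.List.pyGetD_natCast]
  rfl

theorem pvPD_eq (length : Int) (hL0 : 0 ≤ length) (grid : List (List Int)) (i j : Nat) :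
    pvPD length grid (i : Int) (j : Int) = pvWinD grid length.toNat i j := by
  unfold pvPD pvWinD
  rw [pvProdRange0 _ length (by omega)]
  congr 1
  apply List.map_congr_left
  intro k hk
  rw [show (i : Int) + (k : Int) = ((i + k : Nat) : Int) from by push_cast; ring,
      show (j : Int) + (k : Int) = ((j + k : Nat) : Int) from by push_cast; ring]
  simp only [PySem.List.pyGetD_natCast]
  rfl

theorem pvPU_eq (length : Int) (hL0 : 0 ≤ length) (grid : List (List Int)) (i j : Nat)
    (hU : length.toNat ≤ i + 1) :
    pvPU length grid (i : Int) (j : Int) = pvWinU grid length.toNat i j := by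
  unfold pvPU pvWinU
  rw [pvProdRange0 _ length (by omega)]
  congr 1
  apply List.map_congr_left
  intro k hk
  rw [List.mem_range] at hk
  rw [show (i : Int) - (k : Int) = ((i - k : Nat) : Int) from by omega,
      show (j : Int) + (k : Int) = ((j + k : Nat) : Int) from by push_cast; ring]
  simp only [PySem.List.pyGetD_natCast]
  rfl

theorem pvMemIte (c : Prop) [Decidable c] (u p : Int) :
    p ∈ (if c then [u] else ([] : List Int)) ↔ c ∧ p = u := by
  split_ifs with h <;> simp [h]

theorem pvRowLen (grid : List (List Int)) (hsq : ∀ row ∈ grid, row.length = grid.length)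
    (i : Nat) (hi : i < grid.length) : (grid.getD i []).length = grid.length := by
  rw [List.getD_eq_getElem _ _ hi]
  exact hsq _ (List.getElem_mem hi)

theorem pvCandsA_mem (length : Int) (hL : 1 ≤ length) (grid : List (List Int))
    (hsq : ∀ row ∈ grid, row.length = grid.length) (p : Int) :
    p ∈ pvCandsA length grid ↔ pvIsCand length.toNat grid p := by
  have hLc : (length.toNat : Int) = length := Int.toNat_of_nonneg (by omega)
  unfold pvCandsA pvCellCands
  simp only [List.mem_flatMap, PySem.List.mem_pyRange_one, List.mem_append, pvMemIte]
  constructor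
  · rintro ⟨i, ⟨hi0, hin⟩, j, ⟨hj0, hjr⟩, hp⟩
    have hii : i = ((i.toNat : Nat) : Int) := (Int.toNat_of_nonneg hi0).symm
    have hjj : j = ((j.toNat : Nat) : Int) := (Int.toNat_of_nonneg hj0).symm
    have hinn : i.toNat < grid.length := by omega
    have hrl : (PySem.List.pyGetD grid i []).length = grid.length := by
      rw [hii, PySem.List.pyGetD_natCast, pvRowLen grid hsq _ hinn]
    rcases hp with ((⟨hc, rfl⟩ | ⟨hc, rfl⟩) | ⟨⟨hc1, hc2⟩, rfl⟩) | ⟨⟨hc1, hc2⟩, rfl⟩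
    · exact Or.inl ⟨i.toNat, j.toNat, hinn, by omega,
        by rw [hii, hjj, pvPH_eq length (by omega) grid]; congr 1⟩
    · exact Or.inr (Or.inl ⟨i.toNat, j.toNat, by omega, by omega,
        by rw [hii, hjj, pvPV_eq length (by omega) grid]; congr 1⟩)
    · exact Or.inr (Or.inr (Or.inl ⟨i.toNat, j.toNat, by omega, by omega, by omega,
        by rw [hii, hjj, pvPU_eq length (by omega) grid _ _ (by omega)]; congr 1⟩))
    · exact Or.inr (Or.inr (Or.inr ⟨i.toNat, j.toNat, by omega, by omega,
        by rw [hii, hjj, pvPD_eq length (by omega) grid]; congr 1⟩))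
  · have hrl : ∀ i : Nat, i < grid.length → (PySem.List.pyGetD grid ((i : Nat) : Int) []).length = grid.length := by
      intro i hi
      rw [PySem.List.pyGetD_natCast, pvRowLen grid hsq _ hi]
    rintro (⟨i, j, hi, hj, rfl⟩ | ⟨i, j, hi, hj, rfl⟩ | ⟨i, j, hU, hi, hj, rfl⟩ | ⟨i, j, hi, hj, rfl⟩)
    · exact ⟨(i : Int), ⟨by omega, by omega⟩, (j : Int), ⟨by omega, by rw [hrl i hi]; omega⟩,
        Or.inl (Or.inl (Or.inl ⟨by omega, (pvPH_eq length (by omega) grid i j).symm⟩))⟩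
    · exact ⟨(i : Int), ⟨by omega, by omega⟩, (j : Int), ⟨by omega, by rw [hrl i (by omega)]; omega⟩,
        Or.inl (Or.inl (Or.inr ⟨by omega, (pvPV_eq length (by omega) grid i j).symm⟩))⟩
    · exact ⟨(i : Int), ⟨by omega, by omega⟩, (j : Int), ⟨by omega, by rw [hrl i hi]; omega⟩,
        Or.inl (Or.inr ⟨⟨by omega, by omega⟩,
          (pvPU_eq length (by omega) grid i j (by omega)).symm⟩)⟩
    · exact ⟨(i : Int), ⟨by omega, by omega⟩, (j : Int), ⟨by omega, by rw [hrl i (by omega)]; omega⟩,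
        Or.inr ⟨⟨by omega, by omega⟩, (pvPD_eq length (by omega) grid i j).symm⟩⟩

theorem pvRowWin (grid : List (List Int)) (L i s : Nat) (h : s + L ≤ (grid.getD i []).length) :
    pvWinP L (grid.getD i []) s = pvWinH grid L i s := by
  unfold pvWinP pvWinH
  rw [pvDropTake _ s L 0 h]
  rfl

theorem pvGetD_map (g : List Int → Int) (xs : List (List Int)) (t : Nat) (h : t < xs.length) :
    (xs.map g).getD t 0 = g (xs.getD t []) := by
  rw [List.getD_eq_getElem _ _ (by simpa using h), List.getElem_map, List.getD_eq_getElem _ _ h]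

theorem pvColWin (grid : List (List Int)) (L s jn : Nat) (h : s + L ≤ grid.length) :
    pvWinP L (grid.map (fun row => row.getD jn 0)) s = pvWinV grid L s jn := by
  unfold pvWinP pvWinV
  rw [pvDropTake _ s L 0 (by simpa using h)]
  congr 1
  apply List.map_congr_left
  intro k hk
  rw [List.mem_range] at hk
  rw [pvGetD_map _ _ _ (by omega)]
  rfl

theorem pvColLine (grid : List (List Int)) (hsq : ∀ row ∈ grid, row.length = grid.length)
    (j : Int) (hj0 : 0 ≤ j) (hjn : j < (grid.length : Int)) :
    (grid.filter (fun row => decide (j < (row.length : Int)))).map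
        (fun row => PySem.List.pyGetD row j 0) =
      grid.map (fun row => row.getD j.toNat 0) := by
  rw [List.filter_eq_self.mpr]
  · apply List.map_congr_left
    intro row _
    rw [show j = ((j.toNat : Nat) : Int) from by omega, PySem.List.pyGetD_natCast]
    congr 1
  · intro row hrow
    rw [hsq row hrow]
    simp only [decide_eq_true_eq]
    omega

theorem pvCellInt (grid : List (List Int)) (I J : Int) (hI : 0 ≤ I) (hJ : 0 ≤ J) :
    PySem.List.pyGetD (PySem.List.pyGetD grid I []) J 0 = pvCell grid I.toNat J.toNat := by
  obtain ⟨a, rfl⟩ : ∃ a : Nat, I = (a : Int) := ⟨I.toNat, by omega⟩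
  obtain ⟨b, rfl⟩ : ∃ b : Nat, J = (b : Int) := ⟨J.toNat, by omega⟩
  simp only [PySem.List.pyGetD_natCast, Int.toNat_natCast]
  rfl

theorem pvDiagLine (grid : List (List Int)) (hsq : ∀ row ∈ grid, row.length = grid.length) (d : Int) :
    ((PySem.List.pyRange 0 (grid.length : Int) 1).filter (fun i =>
        decide (0 ≤ i - d) && decide (i - d < ((PySem.List.pyGetD grid i []).length : Int)))).map
      (fun i => PySem.List.pyGetD (PySem.List.pyGetD grid i []) (i - d) 0) =
    (List.range ((min (grid.length : Int) ((grid.length : Int) + d) - max 0 d).toNat)).map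
      (fun (k : Nat) => pvCell grid (max 0 d + (k : Int)).toNat ((max 0 d + (k : Int)) - d).toNat) := by
  rw [List.filter_congr (q := fun i => decide (d ≤ i) && decide (i < (grid.length : Int) + d)) ?hq]
  case hq =>
    intro i hi
    rw [PySem.List.mem_pyRange_one] at hi
    have hrl : ((PySem.List.pyGetD grid i []).length : Int) = (grid.length : Int) := by
      rw [show i = ((i.toNat : Nat) : Int) from by omega, PySem.List.pyGetD_natCast,
          pvRowLen grid hsq _ (by omega)]
    rw [hrl, Bool.eq_iff_iff]
    simp only [Bool.and_eq_true, decide_eq_true_eq]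
    omega
  rw [pvFilterRange d ((grid.length : Int) + d) (((grid.length : Int) - 0).toNat) 0 _ rfl]
  rw [PySem.List.pyRange_one, List.map_map]
  apply List.map_congr_left
  intro k hk
  rw [List.mem_range] at hk
  simp only [Function.comp]
  exact pvCellInt grid _ _ (by omega) (by omega)

theorem pvAntiLine (grid : List (List Int)) (hsq : ∀ row ∈ grid, row.length = grid.length) (c : Int) :
    ((PySem.List.pyRange 0 (grid.length : Int) 1).filter (fun j =>
        decide (0 ≤ c - j) && decide (c - j < (grid.length : Int)) &&
        decide (j < ((PySem.List.pyGetD grid (c - j) []).length : Int)))).map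
      (fun j => PySem.List.pyGetD (PySem.List.pyGetD grid (c - j) []) j 0) =
    (List.range ((min (grid.length : Int) (c + 1) - max 0 (c - (grid.length : Int) + 1)).toNat)).map
      (fun (k : Nat) => pvCell grid
        (c - (max 0 (c - (grid.length : Int) + 1) + (k : Int))).toNat
        (max 0 (c - (grid.length : Int) + 1) + (k : Int)).toNat) := by
  rw [List.filter_congr (q := fun j =>
      decide (c - (grid.length : Int) + 1 ≤ j) && decide (j < c + 1)) ?hq]
  case hq =>
    intro j hj
    rw [PySem.List.mem_pyRange_one] at hj
    by_cases hio : 0 ≤ c - j ∧ c - j < (grid.length : Int)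
    · have hrl : ((PySem.List.pyGetD grid (c - j) []).length : Int) = (grid.length : Int) := by
        rw [show c - j = (((c - j).toNat : Nat) : Int) from by omega, PySem.List.pyGetD_natCast,
            pvRowLen grid hsq _ (by omega)]
      rw [hrl, Bool.eq_iff_iff]
      simp only [Bool.and_eq_true, decide_eq_true_eq]
      omega
    · rw [Bool.eq_iff_iff]
      simp only [Bool.and_eq_true, decide_eq_true_eq]
      rcases not_and_or.mp hio with h | h <;> omega
  rw [pvFilterRange (c - (grid.length : Int) + 1) (c + 1) (((grid.length : Int) - 0).toNat) 0 _ rfl]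
  rw [PySem.List.pyRange_one, List.map_map]
  apply List.map_congr_left
  intro k hk
  rw [List.mem_range] at hk
  simp only [Function.comp]
  exact pvCellInt grid _ _ (by omega) (by omega)

theorem pvCandsB_mem (length : Int) (hL : 1 ≤ length) (grid : List (List Int))
    (hsq : ∀ row ∈ grid, row.length = grid.length) (p : Int) :
    p ∈ pvCandsB length.toNat grid ↔ pvIsCand length.toNat grid p := by
  have hL1 : 1 ≤ length.toNat := by omega
  unfold pvCandsB pvLines
  simp only [List.mem_flatMap, List.mem_append]
  constructor
  · rintro ⟨line, hline, hpw⟩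
    rw [pvMemWinProds _ hL1] at hpw
    obtain ⟨s, hs, rfl⟩ := hpw
    rcases hline with ((h1 | h2) | h3) | h4
    · -- rows
      obtain ⟨i, hilt, hEq⟩ := List.mem_iff_getElem.mp h1
      have hEq' : line = grid.getD i [] := by rw [List.getD_eq_getElem _ _ hilt, hEq]
      subst hEq'
      have hrl : (grid.getD i []).length = grid.length := pvRowLen grid hsq i hilt
      exact Or.inl ⟨i, s, hilt, by omega, (pvRowWin grid _ i s (by omega))⟩
    · -- columns
      obtain ⟨j, hjmem, rfl⟩ := List.mem_map.mp h2
      rw [PySem.List.mem_pyRange_one] at hjmem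
      rw [pvColLine grid hsq j hjmem.1 hjmem.2] at hs ⊢
      rw [List.length_map] at hs
      refine Or.inr (Or.inl ⟨s, j.toNat, by omega, by omega, ?_⟩)
      exact pvColWin grid _ s j.toNat (by omega)
    · -- down-right diagonals
      obtain ⟨d, hdmem, rfl⟩ := List.mem_map.mp h3
      rw [pvDiagLine grid hsq d] at hs ⊢
      rw [List.length_map, List.length_range] at hs
      rw [pvWinP_mapRange _ _ _ _ hs]
      refine Or.inr (Or.inr (Or.inr ⟨(max 0 d + (s : Int)).toNat,
        (max 0 d + (s : Int) - d).toNat, by omega, by omega, ?_⟩))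
      unfold pvWinD
      congr 1
      apply List.map_congr_left
      intro k hk
      rw [List.mem_range] at hk
      congr 1 <;> omega
    · -- up-right anti-diagonals
      obtain ⟨c, hcmem, rfl⟩ := List.mem_map.mp h4
      rw [PySem.List.mem_pyRange_one] at hcmem
      rw [pvAntiLine grid hsq c] at hs ⊢
      rw [List.length_map, List.length_range] at hs
      rw [pvWinP_mapRange _ _ _ _ hs]
      refine Or.inr (Or.inr (Or.inl ⟨(c - (max 0 (c - (grid.length : Int) + 1) + (s : Int))).toNat,
        (max 0 (c - (grid.length : Int) + 1) + (s : Int)).toNat, by omega, by omega, by omega, ?_⟩))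
      unfold pvWinU
      congr 1
      apply List.map_congr_left
      intro k hk
      rw [List.mem_range] at hk
      congr 1 <;> omega
  · rintro (⟨i, j, hi, hj, rfl⟩ | ⟨i, j, hi, hj, rfl⟩ | ⟨i, j, hU, hi, hj, rfl⟩ | ⟨i, j, hi, hj, rfl⟩)
    · -- H via rows
      have hrl : (grid.getD i []).length = grid.length := pvRowLen grid hsq i hi
      refine ⟨grid.getD i [], Or.inl (Or.inl (Or.inl ?_)), ?_⟩
      · rw [List.getD_eq_getElem _ _ hi]
        exact List.getElem_mem hi
      · rw [pvMemWinProds _ hL1]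
        exact ⟨j, by omega, (pvRowWin grid _ i j (by omega)).symm⟩
    · -- V via columns
      refine ⟨_, Or.inl (Or.inl (Or.inr (List.mem_map.mpr ⟨(j : Int),
        PySem.List.mem_pyRange_one.mpr ⟨by omega, by omega⟩, rfl⟩))), ?_⟩
      rw [pvColLine grid hsq (j : Int) (by omega) (by omega), pvMemWinProds _ hL1]
      simp only [Int.toNat_natCast]
      refine ⟨i, by rw [List.length_map]; omega, ?_⟩
      exact (pvColWin grid _ i j (by omega)).symm
    · -- U via anti-diagonals
      have hn1 : 1 ≤ grid.length := by omega
      refine ⟨_, Or.inr (List.mem_map.mpr ⟨((i + j : Nat) : Int),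
        PySem.List.mem_pyRange_one.mpr ⟨by omega, by omega⟩, rfl⟩), ?_⟩
      rw [pvAntiLine grid hsq _, pvMemWinProds _ hL1]
      rw [List.length_map, List.length_range]
      refine ⟨((j : Int) - max 0 (((i + j : Nat) : Int) - (grid.length : Int) + 1)).toNat,
        by omega, ?_⟩
      rw [pvWinP_mapRange _ _ _ _ (by omega)]
      unfold pvWinU
      congr 1
      apply List.map_congr_left
      intro k hk
      rw [List.mem_range] at hk
      congr 1 <;> omega
    · -- D via diagonals
      refine ⟨_, Or.inl (Or.inr (List.mem_map.mpr ⟨(i : Int) - (j : Int),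
        PySem.List.mem_pyRange_one.mpr ⟨by omega, by omega⟩, rfl⟩)), ?_⟩
      rw [pvDiagLine grid hsq _, pvMemWinProds _ hL1]
      rw [List.length_map, List.length_range]
      refine ⟨((i : Int) - max 0 ((i : Int) - (j : Int))).toNat, by omega, ?_⟩
      rw [pvWinP_mapRange _ _ _ _ (by omega)]
      unfold pvWinD
      congr 1
      apply List.map_congr_left
      intro k hk
      rw [List.mem_range] at hk
      congr 1 <;> omega

theorem pvSquare (length : Int) (hL : 1 ≤ length) (grid : List (List Int))
    (hsq : ∀ row ∈ grid, row.length = grid.length)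
    (hg : ¬ (grid.map (fun row => (row.length : Int))).foldl max (grid.length : Int) < length) :
    largest_product_grid length grid = largest_product_grid_alt length grid := by
  rw [pvA_eq, pvB_eq length hL grid hg]
  exact pvFoldlMaxEq _ _ 0
    (fun x hx => (pvCandsB_mem length hL grid hsq x).mpr ((pvCandsA_mem length hL grid hsq x).mp hx))
    (fun x hx => (pvCandsA_mem length hL grid hsq x).mpr ((pvCandsB_mem length hL grid hsq x).mp hx))

theorem pvWinH1 (grid : List (List Int)) (i j : Nat) : pvWinH grid 1 i j = pvCell grid i j := by
  simp [pvWinH]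
theorem pvWinV1 (grid : List (List Int)) (i j : Nat) : pvWinV grid 1 i j = pvCell grid i j := by
  simp [pvWinV]
theorem pvWinD1 (grid : List (List Int)) (i j : Nat) : pvWinD grid 1 i j = pvCell grid i j := by
  simp [pvWinD]
theorem pvWinU1 (grid : List (List Int)) (i j : Nat) : pvWinU grid 1 i j = pvCell grid i j := by
  simp [pvWinU]

theorem pvCandsA_mem1 (grid : List (List Int)) (p : Int) :
    p ∈ pvCandsA 1 grid ↔ pvIsCell grid p := by
  unfold pvCandsA pvCellCands
  simp only [List.mem_flatMap, PySem.List.mem_pyRange_one, List.mem_append, pvMemIte]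
  constructor
  · rintro ⟨i, ⟨hi0, hin⟩, j, ⟨hj0, hjr⟩, hp⟩
    have hii : i = ((i.toNat : Nat) : Int) := (Int.toNat_of_nonneg hi0).symm
    have hjj : j = ((j.toNat : Nat) : Int) := (Int.toNat_of_nonneg hj0).symm
    have hjr' : j.toNat < (PySem.List.pyGetD grid i []).length := by omega
    have hjrn : j.toNat < (grid.getD i.toNat []).length := by
      rw [hii, PySem.List.pyGetD_natCast] at hjr'
      exact hjr'
    rcases hp with ((⟨hc, rfl⟩ | ⟨hc, rfl⟩) | ⟨⟨hc1, hc2⟩, rfl⟩) | ⟨⟨hc1, hc2⟩, rfl⟩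
    · refine ⟨i.toNat, j.toNat, by omega, hjrn, ?_⟩
      rw [hii, hjj, pvPH_eq 1 (by omega) grid]
      rw [show (1 : Int).toNat = 1 from rfl, pvWinH1]
      congr 1
    · refine ⟨i.toNat, j.toNat, by omega, hjrn, ?_⟩
      rw [hii, hjj, pvPV_eq 1 (by omega) grid]
      rw [show (1 : Int).toNat = 1 from rfl, pvWinV1]
      congr 1
    · refine ⟨i.toNat, j.toNat, by omega, hjrn, ?_⟩
      rw [hii, hjj, pvPU_eq 1 (by omega) grid _ _ (by omega)]
      rw [show (1 : Int).toNat = 1 from rfl, pvWinU1]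
      congr 1
    · refine ⟨i.toNat, j.toNat, by omega, hjrn, ?_⟩
      rw [hii, hjj, pvPD_eq 1 (by omega) grid]
      rw [show (1 : Int).toNat = 1 from rfl, pvWinD1]
      congr 1
  · rintro ⟨i, j, hi, hj, rfl⟩
    refine ⟨(i : Int), ⟨by omega, by omega⟩, (j : Int), ⟨by omega, ?_⟩, ?_⟩
    · rw [PySem.List.pyGetD_natCast]
      omega
    · refine Or.inl (Or.inl (Or.inr ⟨by omega, ?_⟩))
      rw [pvPV_eq 1 (by omega) grid]
      rw [show (1 : Int).toNat = 1 from rfl, pvWinV1]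

theorem pvWinP1 (line : List Int) (s : Nat) (hs : s < line.length) :
    pvWinP 1 line s = line.getD s 0 := by
  unfold pvWinP
  rw [pvDropTake _ s 1 0 (by omega)]
  simp

theorem pvLines_elem (grid : List (List Int)) (line : List Int) (x : Int)
    (hline : line ∈ pvLines grid) (hx : x ∈ line) : pvIsCell grid x := by
  unfold pvLines at hline
  simp only [List.mem_append] at hline
  rcases hline with ((h1 | h2) | h3) | h4
  · obtain ⟨i, hilt, hEq⟩ := List.mem_iff_getElem.mp h1
    obtain ⟨j, hjlt, hEq2⟩ := List.mem_iff_getElem.mp (hEq ▸ hx)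
    refine ⟨i, j, hilt, by rw [List.getD_eq_getElem _ _ hilt]; omega, ?_⟩
    rw [pvCell, List.getD_eq_getElem _ _ hilt,
        List.getD_eq_getElem _ _ (by omega : j < grid[i].length), hEq2]
  · obtain ⟨jI, hjmem, rfl⟩ := List.mem_map.mp h2
    rw [PySem.List.mem_pyRange_one] at hjmem
    obtain ⟨row, hrowmem, rfl⟩ := List.mem_map.mp hx
    rw [List.mem_filter] at hrowmem
    obtain ⟨i, hilt, hEq⟩ := List.mem_iff_getElem.mp hrowmem.1
    have hjlen : jI < (row.length : Int) := by
      have := hrowmem.2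
      simpa using this
    refine ⟨i, jI.toNat, hilt, ?_, ?_⟩
    · rw [List.getD_eq_getElem _ _ hilt, hEq]
      omega
    · rw [show jI = ((jI.toNat : Nat) : Int) from by omega, PySem.List.pyGetD_natCast,
        pvCell, List.getD_eq_getElem _ _ hilt, hEq]
      congr 1
  · obtain ⟨d, hdmem, rfl⟩ := List.mem_map.mp h3
    obtain ⟨iI, himem, rfl⟩ := List.mem_map.mp hx
    rw [List.mem_filter] at himem
    obtain ⟨hir, hcond⟩ := himem
    rw [PySem.List.mem_pyRange_one] at hir
    simp only [Bool.and_eq_true, decide_eq_true_eq] at hcond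
    refine ⟨iI.toNat, (iI - d).toNat, by omega, ?_, ?_⟩
    · have := hcond.2
      rw [show iI = ((iI.toNat : Nat) : Int) from by omega, PySem.List.pyGetD_natCast] at this
      omega
    · rw [pvCellInt grid _ _ (by omega) (by omega)]
  · obtain ⟨c, hcmem, rfl⟩ := List.mem_map.mp h4
    obtain ⟨jI, hjmem, rfl⟩ := List.mem_map.mp hx
    rw [List.mem_filter] at hjmem
    obtain ⟨hjr, hcond⟩ := hjmem
    rw [PySem.List.mem_pyRange_one] at hjr
    simp only [Bool.and_eq_true, decide_eq_true_eq] at hcond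
    refine ⟨(c - jI).toNat, jI.toNat, by omega, ?_, ?_⟩
    · have := hcond.2
      rw [show c - jI = (((c - jI).toNat : Nat) : Int) from by omega,
        PySem.List.pyGetD_natCast] at this
      omega
    · rw [pvCellInt grid _ _ (by omega) (by omega)]

theorem pvCandsB_mem1 (grid : List (List Int)) (p : Int) :
    p ∈ pvCandsB 1 grid ↔ pvIsCell grid p := by
  unfold pvCandsB
  rw [List.mem_flatMap]
  constructor
  · rintro ⟨line, hline, hpw⟩
    rw [pvMemWinProds _ le_rfl] at hpw
    obtain ⟨s, hs, rfl⟩ := hpw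
    rw [pvWinP1 line s (by omega)]
    refine pvLines_elem grid line _ hline ?_
    rw [List.getD_eq_getElem _ _ (by omega)]
    exact List.getElem_mem _
  · rintro ⟨i, j, hi, hj, rfl⟩
    refine ⟨grid.getD i [], ?_, ?_⟩
    · unfold pvLines
      simp only [List.mem_append]
      refine Or.inl (Or.inl (Or.inl ?_))
      rw [List.getD_eq_getElem _ _ hi]
      exact List.getElem_mem hi
    · rw [pvMemWinProds _ le_rfl]
      exact ⟨j, by omega, (pvWinP1 _ j (by omega)).symm⟩

theorem pvOne (grid : List (List Int))
    (hg : ¬ (grid.map (fun row => (row.length : Int))).foldl max (grid.length : Int) < 1) :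
    largest_product_grid 1 grid = largest_product_grid_alt 1 grid := by
  rw [pvA_eq, pvB_eq 1 le_rfl grid hg]
  exact pvFoldlMaxEq _ _ 0
    (fun x hx => (pvCandsB_mem1 grid x).mpr ((pvCandsA_mem1 grid x).mp hx))
    (fun x hx => (pvCandsA_mem1 grid x).mpr ((pvCandsB_mem1 grid x).mp hx))

theorem pvCands0_all1 (length : Int) (h0 : length ≤ 0) (grid : List (List Int)) :
    ∀ x ∈ pvCandsA length grid, x = 1 := by
  intro x hx
  unfold pvCandsA pvCellCands at hx
  simp only [List.mem_flatMap, List.mem_append, pvMemIte] at hx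
  obtain ⟨i, _, j, _, hp⟩ := hx
  have hH : PySem.List.pyRange j (j + length) 1 = [] := PySem.List.pyRange_one_eq_nil (by omega)
  have hV : PySem.List.pyRange i (i + length) 1 = [] := PySem.List.pyRange_one_eq_nil (by omega)
  have hZ : PySem.List.pyRange 0 length 1 = [] := PySem.List.pyRange_one_eq_nil (by omega)
  rcases hp with ((⟨_, rfl⟩ | ⟨_, rfl⟩) | ⟨_, rfl⟩) | ⟨_, rfl⟩ <;>
    simp [pvPH, pvPV, pvPU, pvPD, hH, hV, hZ]

theorem pvCands0_ne (length : Int) (h0 : length ≤ 0) (grid : List (List Int))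
    (hany : grid.any (fun row => decide (0 < row.length)) = true) :
    (1 : Int) ∈ pvCandsA length grid := by
  rw [List.any_eq_true] at hany
  obtain ⟨row, hrow, hlen⟩ := hany
  rw [decide_eq_true_eq] at hlen
  obtain ⟨i, hilt, hEq⟩ := List.mem_iff_getElem.mp hrow
  unfold pvCandsA pvCellCands
  simp only [List.mem_flatMap, List.mem_append, pvMemIte, PySem.List.mem_pyRange_one]
  refine ⟨(i : Int), ⟨by omega, by omega⟩, 0, ⟨le_rfl, ?_⟩, ?_⟩
  · rw [PySem.List.pyGetD_natCast, List.getD_eq_getElem _ _ hilt, hEq]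
    omega
  · refine Or.inl (Or.inl (Or.inr ⟨by omega, ?_⟩))
    rw [pvPV, PySem.List.pyRange_one_eq_nil (by omega)]
    rfl

theorem pvCands0_nil (length : Int) (grid : List (List Int))
    (hany : ∀ row ∈ grid, row.length = 0) : pvCandsA length grid = [] := by
  unfold pvCandsA
  rw [List.flatMap_eq_nil_iff]
  intro i hi
  rw [PySem.List.mem_pyRange_one] at hi
  have : (PySem.List.pyGetD grid i []).length = 0 := by
    rw [show i = ((i.toNat : Nat) : Int) from by omega, PySem.List.pyGetD_natCast,
      List.getD_eq_getElem _ _ (by omega : i.toNat < grid.length)]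
    exact hany _ (List.getElem_mem _)
  rw [this]
  rw [show ((0 : Nat) : Int) = (0 : Int) from rfl, PySem.List.pyRange_one_eq_nil le_rfl]
  rfl

theorem pvFoldlMaxOnes (l : List Int) (hne : l ≠ []) (h1 : ∀ x ∈ l, x = 1) :
    l.foldl max 0 = 1 := by
  apply le_antisymm
  · rcases pvFoldlMaxMem l 0 with h | h
    · rw [h]; norm_num
    · rw [h1 _ h]
  · obtain ⟨x, hx⟩ := List.exists_mem_of_ne_nil l hne
    have hle := (PySem.List.le_foldl_max l 0).2 x hx
    rw [h1 x hx] at hle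
    exact hle

theorem pvZero (length : Int) (h0 : length ≤ 0) (grid : List (List Int)) :
    largest_product_grid length grid = largest_product_grid_alt length grid := by
  rw [pvA_eq]
  unfold largest_product_grid_alt
  rw [if_pos h0]
  by_cases hany : grid.any (fun row => decide (0 < row.length)) = true
  · rw [if_pos hany]
    refine pvFoldlMaxOnes _ ?_ (pvCands0_all1 length h0 grid)
    intro hnil
    have := pvCands0_ne length h0 grid hany
    rw [hnil] at this
    exact absurd this (List.not_mem_nil)
  · rw [if_neg hany, pvCands0_nil length grid ?_]
    · rfl
    · intro row hrow
      by_contra hlen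
      exact hany (List.any_eq_true.mpr ⟨row, hrow, by simpa using Nat.pos_of_ne_zero hlen⟩)

theorem pvAn0 (length : Int) (grid : List (List Int))
    (hn : (grid.length : Int) < length) : largest_product_grid length grid = 0 := by
  rw [pvA_eq]
  have hnil : pvCandsA length grid = [] := by
    unfold pvCandsA
    rw [List.flatMap_eq_nil_iff]
    intro i hi
    rw [PySem.List.mem_pyRange_one] at hi
    rw [List.flatMap_eq_nil_iff]
    intro j hj
    rw [PySem.List.mem_pyRange_one] at hj
    unfold pvCellCands
    rw [if_neg (by omega), if_neg (by omega), if_neg (by omega), if_neg (by omega)]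
    rfl
  rw [hnil]
  rfl

theorem pvMain (length : Int) (grid : List (List Int))
    (hPre : length ≤ 1 ∨ (∀ row ∈ grid, row.length = grid.length) ∨
      ((grid.length : Int) < length ∧ ∀ row ∈ grid, (row.length : Int) < length)) :
    largest_product_grid length grid = largest_product_grid_alt length grid := by
  by_cases h0 : length ≤ 0
  · exact pvZero length h0 grid
  · by_cases hg : (grid.map (fun row => (row.length : Int))).foldl max (grid.length : Int) < length
    · rw [pvAn0 length grid (lt_of_le_of_lt (PySem.List.le_foldl_max _ _).1 hg)]
      unfold largest_product_grid_alt
      rw [if_neg h0, if_pos hg]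
    · rcases hPre with hl1 | hsq | ⟨hn, hrows⟩
      · have : length = 1 := by omega
        subst this
        exact pvOne grid hg
      · exact pvSquare length (by omega) grid hsq hg
      · exfalso
        apply hg
        rcases pvFoldlMaxMem (grid.map (fun row => (row.length : Int))) (grid.length : Int)
          with h | h
        · rw [h]; exact hn
        · obtain ⟨row, hrow, heq⟩ := List.mem_map.mp h
          rw [← heq]
          exact hrows row hrow

-- ===== VERDICT (by name: the statement is the Claim_ definition above) =====
theorem largest_product_grid_spec : Claim_equal_largest_product_grid := by
  intro length grid _ hPre
  exact pvMain length grid hPre
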